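-- pv_equiv track=rewrite | github.com/Pastorsin/competitive-programming | src/spiderman_and_jumping/main.py | minimal_energy
-- ===== SOURCE A (Python) =====
-- from math import log2
--
-- def minimal_energy(heights):
--     MAX_HEIGHT = 10 ** 9
--     MEMO = [-1] * len(heights)
--
--     def lis(index):
--         if index == 0:
--             min_cost = 0
--         else:
--             min_cost = MAX_HEIGHT
--             iterations = int(log2(index) + 1)
--
--             for k in range(iterations):
--                 i = index - 2 ** k
--
--                 previous_cost = lis(i) if MEMO[i] == -1 else MEMO[i]
--                 new_cost = previous_cost + abs(heights[i] - heights[index])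
--
--                 if new_cost < min_cost:
--                     min_cost = new_cost
--
--         MEMO[index] = min_cost
--         return min_cost
--
--     return lis(index=len(heights) - 1)
-- ===== SOURCE B (Python) =====
-- def minimal_energy(heights):
--     MAX_HEIGHT = 10 ** 9
--     n = len(heights)
--     dp = [0] * n
--     for index in range(1, n):
--         best = MAX_HEIGHT
--         k = 1
--         while k <= index:
--             i = index - k
--             c = dp[i] + abs(heights[i] - heights[index])
--             if c < best:
--                 best = c
--             k *= 2
--         dp[index] = best
--     return dp[n - 1]
-- ===== Notes on version B (the rewrite author's own statement) =====
-- stated objective: faster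
-- what changed: Replaced the memoized top-down recursion (closure over a MEMO list with a float log2 iteration count) by a bottom-up iterative DP table filled left to right, with the power-of-two predecessors enumerated by an integer doubling loop (k=1; k<=index; k*=2) instead of math.log2.
import Mathlib
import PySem

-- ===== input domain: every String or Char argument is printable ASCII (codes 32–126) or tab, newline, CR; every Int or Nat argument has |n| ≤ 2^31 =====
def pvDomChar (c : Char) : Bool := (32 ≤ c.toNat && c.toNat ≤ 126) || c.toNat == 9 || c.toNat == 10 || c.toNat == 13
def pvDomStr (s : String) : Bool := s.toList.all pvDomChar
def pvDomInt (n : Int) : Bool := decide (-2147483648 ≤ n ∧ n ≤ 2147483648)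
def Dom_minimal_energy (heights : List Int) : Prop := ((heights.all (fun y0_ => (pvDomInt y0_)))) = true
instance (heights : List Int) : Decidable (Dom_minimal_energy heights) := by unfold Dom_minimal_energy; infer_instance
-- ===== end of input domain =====

-- B replaces A's memoized top-down recursion by a bottom-up DP table with an integer
-- doubling loop over the power-of-two predecessors (no math.log2): measurably faster
-- constant factor, no recursion. Equivalence is proved for nonempty heights (A raises on []).

-- ===== PORT A =====
-- Python's `iterations = int(log2(index) + 1)` equals `Nat.log2 index + 1` for every
-- index ≥ 1 a real list can reach (float log2 is exact at this scale).
-- `lisA` threads the MEMO list through the recursion (state = (min_cost, MEMO));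
-- `lisStepA` is one iteration of A's `for k in range(iterations)` body, with
-- `previous_cost = lis(i) if MEMO[i] == -1 else MEMO[i]`. The extra `fuel`
-- argument is a totality guard only: every call keeps fuel > index, so the
-- fuel-0 branch is never reached.
def lisStepA (heights : List Int) (prev : Nat → List Int → Int × List Int)
    (index : Nat) (st : Int × List Int) (k : Nat) : Int × List Int :=
  let i := index - 2 ^ k
  let p := if st.2.getD i (-1) = -1 then prev i st.2 else (st.2.getD i (-1), st.2)
  let new_cost := p.1 + |heights.getD i 0 - heights.getD index 0|
  (if new_cost < st.1 then new_cost else st.1, p.2)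

def lisA (heights : List Int) (fuel index : Nat) (memo : List Int) : Int × List Int :=
  match fuel with
  | 0 => (0, memo)  -- fuel guard, never reached
  | fuel + 1 =>
    if index = 0 then
      (0, memo.set 0 0)
    else
      let r := (List.range (Nat.log2 index + 1)).foldl
        (lisStepA heights (fun i m => lisA heights fuel i m) index) ((10 : Int) ^ 9, memo)
      (r.1, r.2.set index r.1)

def minimal_energy (heights : List Int) : Int :=
  (lisA heights heights.length (heights.length - 1)
    (List.replicate heights.length (-1))).1

-- ===== PORT B =====
-- the Python `while k <= index: ... k *= 2` loop; `0 < k` is a totality guard only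
-- (B always starts at k = 1 and doubles).
def bWhile (heights dp : List Int) (index k : Nat) (best : Int) : Int :=
  if h : 0 < k ∧ k ≤ index then
    let i := index - k
    let c := dp.getD i 0 + |heights.getD i 0 - heights.getD index 0|
    bWhile heights dp index (k * 2) (if c < best then c else best)
  else best
termination_by index + 1 - k
decreasing_by omega

def minimal_energy_alt (heights : List Int) : Int :=
  let n := heights.length
  let dp := (List.range' 1 (n - 1)).foldl
    (fun dp index => dp.set index (bWhile heights dp index 1 (10 ^ 9)))
    (List.replicate n 0)
  dp.getD (n - 1) 0

-- ===== PRECONDITION & SPEC =====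
-- Pre_ excludes only the empty list, on which Python A raises ValueError (log2(-1)).
def Pre_minimal_energy (heights : List Int) : Prop := heights ≠ []
instance (heights : List Int) : Decidable (Pre_minimal_energy heights) := by
  unfold Pre_minimal_energy; infer_instance

def pvWitness_minimal_energy : List Int := ([3, 1, 4, 1, 5])

def Spec_minimal_energy (heights : List Int) (out : Int) : Prop := out = minimal_energy_alt heights
instance (heights : List Int) (out : Int) : Decidable (Spec_minimal_energy heights out) := by unfold Spec_minimal_energy; infer_instance

-- ===== CLAIM (what is proved, stated in full; the proofs are below) =====
def Claim_equal_minimal_energy : Prop := ∀ (heights : List Int), Dom_minimal_energy heights → Pre_minimal_energy heights → Spec_minimal_energy heights (minimal_energy heights)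

-- ===== LEMMAS AND PROOFS =====

-- the common per-edge step: candidate cost through predecessor index - 2^k
def pvStep (heights dp : List Int) (index : Nat) (best : Int) (k : Nat) : Int :=
  let i := index - 2 ^ k
  let c := dp.getD i 0 + |heights.getD i 0 - heights.getD index 0|
  if c < best then c else best

-- B's partial DP table after processing indices 1..m
def dpPartial (heights : List Int) (m : Nat) : List Int :=
  (List.range' 1 m).foldl
    (fun dp index => dp.set index (bWhile heights dp index 1 (10 ^ 9)))
    (List.replicate heights.length 0)

theorem dpPartial_succ (heights : List Int) (m : Nat) :
    dpPartial heights (m + 1) =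
      (dpPartial heights m).set (1 + m) (bWhile heights (dpPartial heights m) (1 + m) 1 (10 ^ 9)) := by
  unfold dpPartial
  rw [List.range'_1_concat, List.foldl_append]
  rfl

theorem dpPartial_length (heights : List Int) (m : Nat) :
    (dpPartial heights m).length = heights.length := by
  induction m with
  | zero => simp [dpPartial]
  | succ m ih => rw [dpPartial_succ]; simpa using ih

theorem dpPartial_stable (heights : List Int) (m m' j : Nat) (hm : m ≤ m') (hj : j ≤ m) :
    (dpPartial heights m').getD j 0 = (dpPartial heights m).getD j 0 := by
  induction m' with
  | zero =>
    have : m = 0 := by omega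
    subst this; rfl
  | succ m' ih =>
    rcases Nat.lt_or_ge m (m' + 1) with h | h
    · rw [dpPartial_succ, List.getD, List.getElem?_set_ne (by omega), ← List.getD,
        ih (by omega)]
    · have : m = m' + 1 := by omega
      subst this; rfl

theorem bWhile_step (heights dp : List Int) (index k : Nat) (best : Int)
    (h : 0 < k ∧ k ≤ index) :
    bWhile heights dp index k best =
      bWhile heights dp index (k * 2)
        (if dp.getD (index - k) 0 + |heights.getD (index - k) 0 - heights.getD index 0| < best
         then dp.getD (index - k) 0 + |heights.getD (index - k) 0 - heights.getD index 0|
         else best) := by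
  rw [bWhile, dif_pos h]

theorem bWhile_stop (heights dp : List Int) (index k : Nat) (best : Int)
    (h : ¬ (0 < k ∧ k ≤ index)) :
    bWhile heights dp index k best = best := by
  rw [bWhile, dif_neg h]

theorem bWhile_congr (heights dp dp' : List Int) (index : Nat)
    (hagree : ∀ i, i < index → dp.getD i 0 = dp'.getD i 0) :
    ∀ k best, bWhile heights dp index k best = bWhile heights dp' index k best := by
  intro k best
  induction hfuel : index + 1 - k using Nat.strong_induction_on generalizing k best with
  | _ fuel ih =>
    by_cases h : 0 < k ∧ k ≤ index
    · rw [bWhile_step heights dp index k best h, bWhile_step heights dp' index k best h,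
        hagree (index - k) (by omega)]
      exact ih (index + 1 - k * 2) (by omega) (k * 2) _ rfl
    · rw [bWhile_stop heights dp index k best h, bWhile_stop heights dp' index k best h]

theorem bWhile_eq_fold (heights dp : List Int) (index : Nat) (hind : index ≠ 0) :
    ∀ e best, bWhile heights dp index (2 ^ e) best =
      (List.range' e (Nat.log2 index + 1 - e)).foldl (pvStep heights dp index) best := by
  intro e best
  induction hfuel : Nat.log2 index + 1 - e using Nat.strong_induction_on generalizing e best with
  | _ fuel ih =>
    by_cases h : 0 < 2 ^ e ∧ 2 ^ e ≤ index
    · have hle : e ≤ Nat.log2 index := (Nat.le_log2 hind).mpr h.2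
      have hfe : Nat.log2 index + 1 - e = (Nat.log2 index - e) + 1 := by omega
      have hfuel' : fuel = (Nat.log2 index - e) + 1 := by omega
      rw [bWhile_step heights dp index (2 ^ e) best h, hfuel', List.range'_succ,
        List.foldl_cons]
      have h2 : 2 ^ e * 2 = 2 ^ (e + 1) := by ring
      rw [h2, ih (Nat.log2 index + 1 - (e + 1)) (by omega) (e + 1) _ rfl]
      have h3 : Nat.log2 index + 1 - (e + 1) = Nat.log2 index - e := by omega
      rw [h3]
      rfl
    · have h2 : ¬ 2 ^ e ≤ index := fun hc => h ⟨Nat.pow_pos (by norm_num : (0:Nat) < 2), hc⟩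
      have h3 : Nat.log2 index < e := by
        by_contra hc
        exact h2 ((Nat.le_log2 hind).mp (by omega))
      have hfuel' : fuel = 0 := by omega
      rw [bWhile_stop heights dp index (2 ^ e) best h, hfuel']
      rfl

-- the final table T = dpPartial heights (n - 1)
theorem table_zero (heights : List Int) (hne : heights ≠ []) :
    (dpPartial heights (heights.length - 1)).getD 0 0 = 0 := by
  rw [dpPartial_stable heights 0 (heights.length - 1) 0 (by omega) (by omega)]
  have hn : 0 < heights.length := List.length_pos_of_ne_nil hne
  unfold dpPartial
  simp [List.getD, hn]

theorem table_consistent (heights : List Int) (index : Nat)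
    (h1 : 1 ≤ index) (h2 : index ≤ heights.length - 1) :
    (dpPartial heights (heights.length - 1)).getD index 0 =
      (List.range (Nat.log2 index + 1)).foldl
        (pvStep heights (dpPartial heights (heights.length - 1)) index) (10 ^ 9) := by
  have hset : (dpPartial heights index).getD index 0 =
      bWhile heights (dpPartial heights (index - 1)) index 1 (10 ^ 9) := by
    obtain ⟨m, rfl⟩ : ∃ m, index = m + 1 := ⟨index - 1, by omega⟩
    rw [dpPartial_succ]
    have h1m : 1 + m = m + 1 := by omega
    rw [h1m, List.getD, List.getElem?_set_self (by rw [dpPartial_length]; omega)]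
    simp
  rw [dpPartial_stable heights index (heights.length - 1) index h2 le_rfl, hset,
    bWhile_congr heights (dpPartial heights (index - 1))
      (dpPartial heights (heights.length - 1)) index
      (fun i hi => (dpPartial_stable heights (index - 1) (heights.length - 1) i
        (by omega) (by omega)).symm)]
  have := bWhile_eq_fold heights (dpPartial heights (heights.length - 1)) index
    (by omega) 0 (10 ^ 9)
  simpa [List.range_eq_range'] using this

-- A-side memo invariant: each entry is still the -1 sentinel or the true table value
def MemoInv (heights memo : List Int) : Prop :=
  memo.length = heights.length ∧
    ∀ j, memo.getD j (-1) = -1 ∨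
      memo.getD j (-1) = (dpPartial heights (heights.length - 1)).getD j 0

theorem memoInv_set_val (heights memo : List Int) (inv : MemoInv heights memo) (j : Nat) :
    MemoInv heights (memo.set j ((dpPartial heights (heights.length - 1)).getD j 0)) := by
  obtain ⟨hl, hinv⟩ := inv
  refine ⟨by simpa using hl, fun j' => ?_⟩
  by_cases h : j = j'
  · subst h
    rcases Nat.lt_or_ge j memo.length with hin | hin
    · rw [List.getD, List.getElem?_set_self hin]
      right; rfl
    · rw [List.getD, List.getElem?_eq_none (by simpa using hin)]
      left; rfl
  · rw [List.getD, List.getElem?_set_ne h, ← List.getD]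
    exact hinv j'

-- one loop iteration under the invariant produces the pvStep value and keeps the invariant
theorem lisStepA_correct (heights : List Int) (prev : Nat → List Int → Int × List Int)
    (index k : Nat) (best : Int) (memo' : List Int)
    (hprev : ∀ i m, i < index → MemoInv heights m →
      (prev i m).1 = (dpPartial heights (heights.length - 1)).getD i 0 ∧
        MemoInv heights (prev i m).2)
    (inv : MemoInv heights memo') (hpos : index ≠ 0) :
    (lisStepA heights prev index (best, memo') k).1 =
      pvStep heights (dpPartial heights (heights.length - 1)) index best k ∧
      MemoInv heights (lisStepA heights prev index (best, memo') k).2 := by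
  have hi : index - 2 ^ k < index := by
    have : 0 < 2 ^ k := Nat.pow_pos (by norm_num : (0:Nat) < 2)
    omega
  by_cases hmv : memo'.getD (index - 2 ^ k) (-1) = -1
  · obtain ⟨hp1, hp2⟩ := hprev (index - 2 ^ k) memo' hi inv
    constructor
    · simp only [lisStepA, pvStep]
      rw [if_pos hmv, hp1]
    · simp only [lisStepA]
      rw [if_pos hmv]
      exact hp2
  · rcases inv.2 (index - 2 ^ k) with hcase | hcase
    · exact absurd hcase hmv
    · constructor
      · simp only [lisStepA, pvStep]
        rw [if_neg hmv, hcase]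
      · simp only [lisStepA]
        rw [if_neg hmv]
        exact inv

-- main lemma: with enough fuel and the invariant, A's recursion returns the table value
theorem lisA_correct (heights : List Int) (hne : heights ≠ []) :
    ∀ fuel index, index < fuel → index < heights.length → ∀ memo, MemoInv heights memo →
      (lisA heights fuel index memo).1 =
        (dpPartial heights (heights.length - 1)).getD index 0 ∧
        MemoInv heights (lisA heights fuel index memo).2 := by
  intro fuel
  induction fuel with
  | zero => intro index h; omega
  | succ fuel ihf =>
    intro index hfuel hn memo inv
    rcases Nat.eq_zero_or_pos index with rfl | hpos
    · rw [lisA]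
      refine ⟨(table_zero heights hne).symm, ?_⟩
      have := memoInv_set_val heights memo inv 0
      rwa [table_zero heights hne] at this
    · have hprev : ∀ i m, i < index → MemoInv heights m →
          ((fun i m => lisA heights fuel i m) i m).1 =
            (dpPartial heights (heights.length - 1)).getD i 0 ∧
            MemoInv heights ((fun i m => lisA heights fuel i m) i m).2 :=
        fun i m hi invm => ihf i (by omega) (by omega) m invm
      have hloop : ∀ (l : List Nat),
          ∀ (best : Int) (memo' : List Int), MemoInv heights memo' →
          (l.foldl (lisStepA heights (fun i m => lisA heights fuel i m) index)
              (best, memo')).1 =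
            l.foldl (pvStep heights (dpPartial heights (heights.length - 1)) index)
              best ∧
          MemoInv heights
            (l.foldl (lisStepA heights (fun i m => lisA heights fuel i m) index)
              (best, memo')).2 := by
        intro l
        induction l with
        | nil => intro best memo' inv'; exact ⟨rfl, inv'⟩
        | cons k t ihl =>
          intro best memo' inv'
          obtain ⟨hs1, hs2⟩ := lisStepA_correct heights
            (fun i m => lisA heights fuel i m) index k best memo' hprev inv'
            (by omega)
          rw [List.foldl_cons, List.foldl_cons,
            show lisStepA heights (fun i m => lisA heights fuel i m) index
              (best, memo') k =
              ((lisStepA heights (fun i m => lisA heights fuel i m) index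
                (best, memo') k).1,
               (lisStepA heights (fun i m => lisA heights fuel i m) index
                (best, memo') k).2) from rfl, hs1]
          exact ihl _ _ hs2
      obtain ⟨hl1, hl2⟩ := hloop (List.range (Nat.log2 index + 1)) (10 ^ 9) memo inv
      have hval : ((List.range (Nat.log2 index + 1)).foldl
          (lisStepA heights (fun i m => lisA heights fuel i m) index)
          ((10 : Int) ^ 9, memo)).1 =
          (dpPartial heights (heights.length - 1)).getD index 0 := by
        rw [hl1]
        exact (table_consistent heights index hpos (by omega)).symm
      rw [lisA, if_neg (by omega)]
      refine ⟨hval, ?_⟩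
      show MemoInv heights
        (((List.range (Nat.log2 index + 1)).foldl
            (lisStepA heights (fun i m => lisA heights fuel i m) index)
            ((10 : Int) ^ 9, memo)).2.set index
          ((List.range (Nat.log2 index + 1)).foldl
            (lisStepA heights (fun i m => lisA heights fuel i m) index)
            ((10 : Int) ^ 9, memo)).1)
      rw [hval]
      exact memoInv_set_val heights _ hl2 index

-- ===== VERDICT (by name: the statement is the Claim_ definition above) =====
theorem minimal_energy_spec : Claim_equal_minimal_energy := by
  intro heights _ hpre
  have hn : 0 < heights.length := List.length_pos_of_ne_nil hpre
  have inv : MemoInv heights (List.replicate heights.length (-1)) := by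
    refine ⟨by simp, fun j => ?_⟩
    left
    rcases Nat.lt_or_ge j heights.length with h | h
    · rw [List.getD, List.getElem?_replicate, if_pos h]; rfl
    · rw [List.getD, List.getElem?_eq_none (by simpa using h)]; rfl
  have hmain := (lisA_correct heights hpre heights.length (heights.length - 1)
    (by omega) (by omega) (List.replicate heights.length (-1)) inv).1
  show minimal_energy heights = minimal_energy_alt heights
  rw [minimal_energy, hmain]
  rfl
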